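-- pv_equiv track=rewrite | github.com/caudate-julie/GoogleCodeJams | Google Code Jam 2019/00 - Qualification Round/B.py | YourOwnWay
-- ===== SOURCE A (Python) =====
-- def YourOwnWay(path, n):
--     if path[0] == 'S':
--         prime, second = 'E', 'S'
--     else:
--         prime, second = 'S', 'E'
--     if path[-1] == prime:
--         return (prime * n) + (second * n)
--
--     count = 1
--     for i in range(2*n - 1):
--         if path[i] == path[i + 1] == prime:
--             return (prime * count) + (second * n) + (prime * (n - count))
--         if path[i] == prime:
--             count += 1
-- ===== SOURCE B (Python) =====
-- def YourOwnWay(path, n):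
--     if path[0] == 'S':
--         prime, second = 'E', 'S'
--     else:
--         prime, second = 'S', 'E'
--     if path[-1] == prime:
--         return prime * n + second * n
--     # Stage 1: run-length encode the whole path into maximal runs [char, length].
--     runs = []
--     for c in path:
--         if runs and runs[-1][0] == c:
--             runs[-1][1] += 1
--         else:
--             runs.append([c, 1])
--     # Stage 2: walk the runs; the first prime-run of length >= 2 that starts in
--     # range is the place to deviate; each earlier prime run is a single step.
--     count = 1
--     start = 0
--     for c, ln in runs:
--         if start > 2 * n - 2:
--             break
--         if c == prime:
--             if ln >= 2:
--                 return prime * count + second * n + prime * (n - count)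
--             count += 1
--         start += ln
-- ===== Notes on version B (the rewrite author's own statement) =====
-- stated objective: alternative
-- what changed: A's single fused per-index scan (looking at each adjacent pair while maintaining a running counter) is replaced by a two-stage algorithm over a different representation: B first run-length encodes the path into maximal runs, then walks the run list -- the first in-range prime run of length >= 2 is the deviation point and each earlier prime run counts as one step.
import Mathlib
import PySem

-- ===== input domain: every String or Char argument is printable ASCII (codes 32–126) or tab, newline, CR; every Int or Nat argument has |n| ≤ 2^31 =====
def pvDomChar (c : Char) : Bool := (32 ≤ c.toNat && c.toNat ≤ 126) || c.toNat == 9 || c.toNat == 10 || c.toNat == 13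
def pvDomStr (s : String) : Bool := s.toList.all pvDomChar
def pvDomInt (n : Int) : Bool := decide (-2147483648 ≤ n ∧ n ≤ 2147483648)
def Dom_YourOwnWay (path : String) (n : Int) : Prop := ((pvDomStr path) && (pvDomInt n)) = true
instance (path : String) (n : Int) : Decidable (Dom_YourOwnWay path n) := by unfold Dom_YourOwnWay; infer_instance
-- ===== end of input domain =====

-- B replaces A's fused per-index pair scan (search for a doubled move while keeping a
-- running counter) by a two-stage algorithm on a different representation: it first
-- run-length encodes the path into maximal runs, then walks the runs — the first
-- in-range prime run of length ≥ 2 is the deviation point, and every earlier prime run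
-- is one counted step; objective: alternative (same O(n) cost, different structure).

-- ===== PORT A =====
-- the for-loop of A: iterates over the range indices, carrying `count`; `none` covers both
-- Python's fall-through None and an IndexError (IndexError is excluded by Pre_)
def pvLoopA (cs : List Char) (p s : Char) (n : Int) : List Int → Int → Option String
  | [], _ => none
  | i :: rest, count =>
    match PySem.List.pyGet? cs i, PySem.List.pyGet? cs (i + 1) with
    | some a, some b =>
      if a = b ∧ b = p then
        some (String.ofList (PySem.List.pyRepeat [p] count ++ PySem.List.pyRepeat [s] n
              ++ PySem.List.pyRepeat [p] (n - count)))
      else pvLoopA cs p s n rest (if a = p then count + 1 else count)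
    | _, _ => none

def YourOwnWay (path : String) (n : Int) : Option String :=
  match PySem.Str.pyGet? path 0 with
  | none => none   -- IndexError on path[0] (excluded by Pre_)
  | some c0 =>
    let pr := if c0 = 'S' then 'E' else 'S'
    let sec := if c0 = 'S' then 'S' else 'E'
    match PySem.Str.pyGet? path (-1) with
    | none => none
    | some clast =>
      if clast = pr then
        some (String.ofList (PySem.List.pyRepeat [pr] n ++ PySem.List.pyRepeat [sec] n))
      else
        pvLoopA path.toList pr sec n (PySem.List.pyRange 0 (2 * n - 1) 1) 1

-- ===== PORT B =====
-- stage 1 of B: the run-length-encoding loop. Python appends to `runs` and mutates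
-- runs[-1]; the accumulator keeps the runs head-first (head = Python's runs[-1], the
-- same values) and is reversed once at the end.
def pvStep (runs : List (Char × Int)) (x : Char) : List (Char × Int) :=
  match runs with
  | (c, len) :: rest => if c = x then (c, len + 1) :: rest else (x, 1) :: (c, len) :: rest
  | [] => [(x, 1)]

def pvRLE (cs : List Char) : List (Char × Int) :=
  (cs.foldl pvStep []).reverse

-- stage 2 of B: the run walk, carrying `count` and `start`; `none` is the fall-through
-- None (loop exhausted or `break`)
def pvLoopB (p s : Char) (n : Int) : List (Char × Int) → Int → Int → Option String
  | [], _, _ => none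
  | (c, len) :: rest, count, start =>
    if 2 * n - 2 < start then none   -- break
    else if c = p then
      if 2 ≤ len then
        some (String.ofList (PySem.List.pyRepeat [p] count ++ PySem.List.pyRepeat [s] n
              ++ PySem.List.pyRepeat [p] (n - count)))
      else pvLoopB p s n rest (count + 1) (start + len)
    else pvLoopB p s n rest count (start + len)

def YourOwnWay_alt (path : String) (n : Int) : Option String :=
  match PySem.Str.pyGet? path 0 with
  | none => none   -- IndexError on path[0] (excluded by Pre_)
  | some c0 =>
    let pr := if c0 = 'S' then 'E' else 'S'
    let sec := if c0 = 'S' then 'S' else 'E'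
    match PySem.Str.pyGet? path (-1) with
    | none => none
    | some clast =>
      if clast = pr then
        some (String.ofList (PySem.List.pyRepeat [pr] n ++ PySem.List.pyRepeat [sec] n))
      else
        pvLoopB pr sec n (pvRLE path.toList) 1 0

-- ===== PRECONDITION & SPEC =====
-- the letter A's loop hunts for (the opposite of the first letter)
def pvPrime (cs : List Char) : Char := if cs.headD 'S' = 'S' then 'E' else 'S'

-- Pre_ excludes exactly the inputs where Python A raises an IndexError: the empty path
-- (path[0]), and paths shorter than 2n whose scan neither returns early (no doubled prime
-- letter anywhere, last letter not the prime letter) before the loop reads past the end.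
def Pre_YourOwnWay (path : String) (n : Int) : Prop :=
  path.toList ≠ [] ∧
  (2 * n ≤ (path.toList.length : Int)
   ∨ path.toList.getLast? = some (pvPrime path.toList)
   ∨ PySem.Chars.isIn [pvPrime path.toList, pvPrime path.toList] path.toList = true)
instance (path : String) (n : Int) : Decidable (Pre_YourOwnWay path n) := by
  unfold Pre_YourOwnWay; infer_instance

def pvWitness_YourOwnWay : String × Int := ("SESE", 2)

def Spec_YourOwnWay (path : String) (n : Int) (out : Option String) : Prop :=
  out = YourOwnWay_alt path n
instance (path : String) (n : Int) (out : Option String) : Decidable (Spec_YourOwnWay path n out) := by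
  unfold Spec_YourOwnWay; infer_instance

-- ===== CLAIM (what is proved, stated in full; the proofs are below) =====
def Claim_equal_YourOwnWay : Prop := ∀ (path : String) (n : Int),
  Dom_YourOwnWay path n → Pre_YourOwnWay path n → Spec_YourOwnWay path n (YourOwnWay path n)

-- ===== LEMMAS AND PROOFS =====

-- the string both early returns build
def pvOut (p s : Char) (n count : Int) : Option String :=
  some (String.ofList (PySem.List.pyRepeat [p] count ++ PySem.List.pyRepeat [s] n
        ++ PySem.List.pyRepeat [p] (n - count)))

-- A's loop re-expressed structurally: fuel m = remaining range length, list = unprocessed suffix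
def pvScan (p s : Char) (n : Int) : Int → List Char → Int → Option String
  | m, a :: b :: rest, count =>
    if m ≤ 0 then none
    else if a = b ∧ b = p then pvOut p s n count
    else pvScan p s n (m - 1) (b :: rest) (if a = p then count + 1 else count)
  | _, _, _ => none
  termination_by m cs _ => cs.length
  decreasing_by simp

-- the structural (front-to-back) recursion computing B's run-length encoding:
-- current run char c of accumulated length len, remaining characters xs
def pvRleA : List Char → Char → Int → List (Char × Int)
  | [], c, len => [(c, len)]
  | x :: xs, c, len => if c = x then pvRleA xs c (len + 1) else (c, len) :: pvRleA xs x 1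

lemma pvLoopA_eq (cs : List Char) (p s : Char) (n : Int) :
    ∀ (d k : Nat) (count : Int), cs.length - k ≤ d →
    pvLoopA cs p s n (PySem.List.pyRange (k : Int) (2 * n - 1) 1) count
      = pvScan p s n (2 * n - 1 - (k : Int)) (cs.drop k) count := by
  intro d
  induction d with
  | zero =>
    intro k count hd
    have hk : cs.length ≤ k := by omega
    have hdrop : cs.drop k = [] := List.drop_eq_nil_of_le hk
    rw [hdrop]
    by_cases hlt : (k : Int) < 2 * n - 1
    · rw [PySem.List.pyRange_one_cons hlt]
      have e0 : PySem.List.pyGet? cs (k : Int) = none := by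
        rw [PySem.List.pyGet?_natCast]
        simp; omega
      simp only [pvLoopA, e0]
      simp [pvScan]
    · have hr : PySem.List.pyRange (k : Int) (2 * n - 1) 1 = [] := by
        simp [PySem.List.pyRange]; omega
      rw [hr]
      simp [pvLoopA, pvScan]
  | succ d ih =>
    intro k count hd
    by_cases hlt : (k : Int) < 2 * n - 1
    case neg =>
      have hr : PySem.List.pyRange (k : Int) (2 * n - 1) 1 = [] := by
        simp [PySem.List.pyRange]; omega
      rw [hr]
      have hm : 2 * n - 1 - (k : Int) ≤ 0 := by omega
      cases hdk : cs.drop k with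
      | nil => simp [pvLoopA, pvScan]
      | cons a t => cases t with
        | nil => simp [pvLoopA, pvScan]
        | cons b rest => simp [pvLoopA, pvScan, hm]
    case pos =>
      rw [PySem.List.pyRange_one_cons hlt]
      have hget : PySem.List.pyGet? cs (k : Int) = (cs.drop k)[0]? := by
        rw [PySem.List.pyGet?_natCast]
        simp [List.getElem?_drop]
      have hget1 : PySem.List.pyGet? cs ((k : Int) + 1) = (cs.drop k)[1]? := by
        have hc : (k : Int) + 1 = ((k + 1 : Nat) : Int) := by push_cast; ring
        rw [hc, PySem.List.pyGet?_natCast]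
        simp [List.getElem?_drop]
      cases hdk : cs.drop k with
      | nil =>
        rw [hdk] at hget
        simp only [List.getElem?_nil] at hget
        simp only [pvLoopA, hget]
        simp [pvScan]
      | cons a t =>
        rw [hdk] at hget hget1
        cases t with
        | nil =>
          simp only [List.getElem?_cons_zero] at hget
          simp only [List.getElem?_cons_succ, List.getElem?_nil] at hget1
          simp only [pvLoopA, hget, hget1]
          simp [pvScan]
        | cons b rest =>
          simp only [List.getElem?_cons_zero] at hget
          simp only [List.getElem?_cons_succ, List.getElem?_cons_zero] at hget1
          simp only [pvLoopA, hget, hget1]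
          have hm : ¬ (2 * n - 1 - (k : Int) ≤ 0) := by omega
          rw [pvScan]
          simp only [hm, if_false]
          by_cases hp : a = b ∧ b = p
          · simp [hp, pvOut]
          · simp only [if_neg hp]
            have hdk1 : cs.drop (k + 1) = b :: rest := by
              rw [← List.tail_drop, hdk]; rfl
            have hklen : k < cs.length := by
              by_contra hcon
              rw [List.drop_eq_nil_of_le (by omega)] at hdk
              simp at hdk
            have hrec := ih (k + 1) (if a = p then count + 1 else count) (by omega)
            rw [hdk1] at hrec
            have hcast : ((k + 1 : Nat) : Int) = (k : Int) + 1 := by push_cast; ring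
            rw [hcast] at hrec
            have hm2 : 2 * n - 1 - ((k : Int) + 1) = 2 * n - 1 - (k : Int) - 1 := by ring
            rw [hm2] at hrec
            rw [hrec]

lemma pvScan_nonpos (p s : Char) (n m : Int) (cs : List Char) (count : Int) (hm : m ≤ 0) :
    pvScan p s n m cs count = none := by
  cases cs with
  | nil => simp [pvScan]
  | cons a t => cases t with
    | nil => simp [pvScan]
    | cons b r => simp [pvScan, hm]

-- consuming a block of non-prime letters only burns fuel
lemma pvScan_rep (p s : Char) (n : Int) (c : Char) (hc : c ≠ p) :
    ∀ (k : Nat) (m count : Int) (ys : List Char),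
    pvScan p s n m (List.replicate k c ++ ys) count = pvScan p s n (m - k) ys count := by
  intro k
  induction k with
  | zero => intro m count ys; simp
  | succ k ih =>
    intro m count ys
    rw [List.replicate_succ, List.cons_append]
    cases htail : List.replicate k c ++ ys with
    | nil =>
      have hk : k = 0 ∧ ys = [] := by
        constructor
        · by_contra h
          have : 0 < (List.replicate k c ++ ys).length := by
            simp; omega
          rw [htail] at this; simp at this
        · cases ys with
          | nil => rfl
          | cons y t =>
            have : 0 < (List.replicate k c ++ y :: t).length := by simp
            rw [htail] at this; simp at this
      obtain ⟨hk0, hys⟩ := hk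
      subst hk0 hys
      simp [pvScan]
    | cons x rest =>
      rw [pvScan]
      by_cases hm : m ≤ 0
      · rw [if_pos hm, pvScan_nonpos p s n _ ys count (by push_cast; omega)]
      · have hnp : ¬ (c = x ∧ x = p) := by
          rintro ⟨h1, h2⟩; exact hc (h1.trans h2)
        rw [if_neg hm, if_neg hnp, if_neg hc, ← htail, ih]
        congr 1
        push_cast; ring

-- the key correspondence: A's per-character scan over c^len ++ xs equals B's run walk
-- over the runs pvRleA xs c len, with start = 2n-1-m
lemma pvScan_eq_loopB (p s : Char) (n : Int) :
    ∀ (xs : List Char) (c : Char) (len m count : Int), 1 ≤ len →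
    pvScan p s n m (List.replicate len.toNat c ++ xs) count
      = pvLoopB p s n (pvRleA xs c len) count (2 * n - 1 - m) := by
  intro xs
  induction xs with
  | nil =>
    intro c len m count hlen
    rw [pvRleA, pvLoopB]
    by_cases hm : 2 * n - 2 < 2 * n - 1 - m
    · rw [if_pos hm, pvScan_nonpos p s n m _ count (by omega)]
    · rw [if_neg hm]
      have hm0 : ¬ m ≤ 0 := by omega
      by_cases hcp : c = p
      · rw [if_pos hcp]
        by_cases h2 : 2 ≤ len
        · rw [if_pos h2]
          have hrep : List.replicate len.toNat c ++ ([] : List Char)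
              = c :: c :: List.replicate (len.toNat - 2) c := by
            rw [List.append_nil, show len.toNat = (len.toNat - 2) + 1 + 1 by omega]
            simp [List.replicate_succ]
          rw [hrep, pvScan, if_neg hm0, if_pos ⟨rfl, hcp⟩]
          simp [pvOut]
        · rw [if_neg h2]
          have hl1 : len = 1 := by omega
          subst hl1
          simp [pvScan, pvLoopB]
      · rw [if_neg hcp]
        rw [pvScan_rep p s n c hcp]
        simp [pvScan, pvLoopB]
  | cons x xs ih =>
    intro c len m count hlen
    by_cases hcx : c = x
    · subst hcx
      rw [pvRleA, if_pos rfl]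
      have hrep : List.replicate len.toNat c ++ c :: xs
          = List.replicate (len + 1).toNat c ++ xs := by
        rw [show (len + 1).toNat = len.toNat + 1 by omega, List.replicate_succ']
        simp
      rw [hrep, ih c (len + 1) m count (by omega)]
    · rw [pvRleA, if_neg hcx, pvLoopB]
      by_cases hm : 2 * n - 2 < 2 * n - 1 - m
      · rw [if_pos hm, pvScan_nonpos p s n m _ count (by omega)]
      · rw [if_neg hm]
        have hm0 : ¬ m ≤ 0 := by omega
        by_cases hcp : c = p
        · rw [if_pos hcp]
          by_cases h2 : 2 ≤ len
          · rw [if_pos h2]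
            have hrep : List.replicate len.toNat c ++ x :: xs
                = c :: c :: (List.replicate (len.toNat - 2) c ++ x :: xs) := by
              rw [show len.toNat = (len.toNat - 2) + 1 + 1 by omega]
              simp [List.replicate_succ]
            rw [hrep, pvScan, if_neg hm0, if_pos ⟨rfl, hcp⟩]
            simp [pvOut]
          · rw [if_neg h2]
            have hl1 : len = 1 := by omega
            subst hl1
            have hrep : List.replicate (1 : Int).toNat c ++ x :: xs = c :: x :: xs := by
              simp
            rw [hrep, pvScan, if_neg hm0]
            have hxp : x ≠ p := fun h => hcx (hcp.trans h.symm)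
            have hnp : ¬ (c = x ∧ x = p) := by rintro ⟨h1, h2⟩; exact hxp h2
            rw [if_neg hnp, if_pos hcp]
            have hih := ih x 1 (m - 1) (count + 1) le_rfl
            have hrep1 : List.replicate (1 : Int).toNat x ++ xs = x :: xs := by simp
            rw [hrep1] at hih
            rw [hih]
            congr 1
            omega
        · rw [if_neg hcp]
          rw [pvScan_rep p s n c hcp]
          have hih := ih x 1 (m - len.toNat) count le_rfl
          have hrep1 : List.replicate (1 : Int).toNat x ++ xs = x :: xs := by simp
          rw [hrep1] at hih
          rw [hih]
          congr 1
          omega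

-- the foldl of B's stage 1 computes pvRleA (accumulator reversed)
lemma pvRLE_go (xs : List Char) :
    ∀ (c : Char) (len : Int) (acc : List (Char × Int)),
    (xs.foldl pvStep ((c, len) :: acc)).reverse = acc.reverse ++ pvRleA xs c len := by
  induction xs with
  | nil => intro c len acc; simp [pvRleA]
  | cons x xs ih =>
    intro c len acc
    rw [List.foldl_cons]
    by_cases h : c = x
    · rw [show pvStep ((c, len) :: acc) x = (c, len + 1) :: acc by simp [pvStep, h]]
      rw [pvRleA, if_pos h, ih]
    · rw [show pvStep ((c, len) :: acc) x = (x, 1) :: (c, len) :: acc by simp [pvStep, h]]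
      rw [pvRleA, if_neg h, ih]
      simp

lemma pvRLE_cons (c : Char) (cs : List Char) : pvRLE (c :: cs) = pvRleA cs c 1 := by
  rw [pvRLE, List.foldl_cons]
  rw [show pvStep [] c = [(c, 1)] from rfl]
  simpa using pvRLE_go cs c 1 []

-- ===== VERDICT (by name: the statement is the Claim_ definition above) =====
theorem YourOwnWay_spec : Claim_equal_YourOwnWay := by
  intro path n _ hpre
  unfold Spec_YourOwnWay
  obtain ⟨hne, -⟩ := hpre
  unfold YourOwnWay YourOwnWay_alt
  cases hcs : path.toList with
  | nil => exact absurd hcs hne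
  | cons c0 rest =>
    have hget0 : PySem.Str.pyGet? path 0 = some c0 := by
      rw [show (0:Int) = ((0:Nat):Int) from rfl, PySem.Str.pyGet?_natCast, hcs]
      rfl
    have hlastne : (c0 :: rest).getLast? = some ((c0 :: rest).getLast (by simp)) :=
      List.getLast?_eq_some_getLast _
    have hget1 : PySem.Str.pyGet? path (-1) = some ((c0 :: rest).getLast (by simp)) := by
      simp only [PySem.Str.pyGet?_eq, PySem.Chars.pyGet?_eq_listPyGet?, hcs,
        PySem.List.pyGet?_neg_one, hlastne]
    rw [hget0, hget1]
    simp only []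
    set pr := if c0 = 'S' then 'E' else 'S' with hpr
    set sec := if c0 = 'S' then 'S' else 'E' with hsec
    by_cases hl : (c0 :: rest).getLast (by simp) = pr
    · rw [if_pos hl, if_pos hl]
    · rw [if_neg hl, if_neg hl]
      rw [show (0:Int) = ((0:Nat):Int) from rfl]
      rw [pvLoopA_eq (c0 :: rest) pr sec n (c0 :: rest).length 0 1 (by omega)]
      rw [show (2 * n - 1 - ((0:Nat):Int)) = 2 * n - 1 by push_cast; ring]
      rw [List.drop_zero, pvRLE_cons]
      have hmain := pvScan_eq_loopB pr sec n rest c0 1 (2 * n - 1) 1 le_rfl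
      have hrep1 : List.replicate (1 : Int).toNat c0 ++ rest = c0 :: rest := by simp
      rw [hrep1] at hmain
      rw [hmain]
      congr 1
      omega
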